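-- pv_equiv track=rewrite | github.com/foxzool/openlark | tools/api_contracts/rust_source.py | preceding_attrs
-- ===== SOURCE A (Python) =====
-- def preceding_attrs(text: str, start_index: int) -> str:
--     prefix = text[:start_index]
--     lines = prefix.splitlines()
--     attrs: list[str] = []
--     for line in reversed(lines):
--         stripped = line.strip()
--         if stripped.startswith("#["):
--             attrs.append(stripped)
--             continue
--         if not stripped:
--             continue
--         break
--     return "\n".join(reversed(attrs))
-- ===== SOURCE B (Python) =====
-- def preceding_attrs(text: str, start_index: int) -> str:
--     current: list[str] = []
--     for line in text[:start_index].splitlines():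
--         stripped = line.strip()
--         if stripped.startswith("#["):
--             current.append(stripped)
--         elif stripped:
--             current = []
--     return "\n".join(current)
-- ===== Notes on version B (the rewrite author's own statement) =====
-- stated objective: simpler
-- what changed: Replaces the backward scan with break (collect attrs, skip blanks, stop at first other line, then reverse) by a single forward pass that appends '#[' lines to a buffer, keeps it across blank lines, and resets it on any other line; no reversals needed.
import Mathlib
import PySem

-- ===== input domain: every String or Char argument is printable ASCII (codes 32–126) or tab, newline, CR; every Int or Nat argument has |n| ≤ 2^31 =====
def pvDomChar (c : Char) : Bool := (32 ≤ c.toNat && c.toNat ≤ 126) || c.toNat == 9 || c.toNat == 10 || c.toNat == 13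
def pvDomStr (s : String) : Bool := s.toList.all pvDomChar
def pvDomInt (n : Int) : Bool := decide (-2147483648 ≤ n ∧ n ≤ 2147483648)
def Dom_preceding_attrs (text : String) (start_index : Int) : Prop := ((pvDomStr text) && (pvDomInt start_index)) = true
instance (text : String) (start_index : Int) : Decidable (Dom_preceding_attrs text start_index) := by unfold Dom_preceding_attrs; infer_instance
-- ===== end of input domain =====

-- B replaces A's backward scan-with-break (then reverse) by one forward pass that resets its buffer on non-attribute, non-blank lines; same output, simpler decomposition.


-- ===== PORT A =====
-- loop body of A: over reversed(lines), accumulating attrs, with break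
def prAttrsLoopA : List String → List String → List String
  | [], attrs => attrs
  | line :: rest, attrs =>
    let stripped := PySem.Str.strip line
    if PySem.Str.startswith stripped "#[" then prAttrsLoopA rest (attrs ++ [stripped])
    else if stripped = "" then prAttrsLoopA rest attrs
    else attrs

def preceding_attrs (text : String) (start_index : Int) : String :=
  let prefixS := PySem.Str.slice text none (some start_index)
  let lines := PySem.Str.splitlines prefixS
  let attrs := prAttrsLoopA lines.reverse []
  PySem.Str.join "\n" attrs.reverse

-- ===== PORT B =====
-- forward pass: append '#[' lines, keep buffer on blank lines, reset otherwise
def prAttrsStepB (current : List String) (line : String) : List String :=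
  let stripped := PySem.Str.strip line
  if PySem.Str.startswith stripped "#[" then current ++ [stripped]
  else if stripped ≠ "" then []
  else current

def preceding_attrs_alt (text : String) (start_index : Int) : String :=
  let lines := PySem.Str.splitlines (PySem.Str.slice text none (some start_index))
  PySem.Str.join "\n" (lines.foldl prAttrsStepB [])

-- ===== PRECONDITION & SPEC =====
def Spec_preceding_attrs (text : String) (start_index : Int) (out : String) : Prop := out = preceding_attrs_alt text start_index
instance (text : String) (start_index : Int) (out : String) : Decidable (Spec_preceding_attrs text start_index out) := by unfold Spec_preceding_attrs; infer_instance

-- ===== CLAIM (what is proved, stated in full; the proofs are below) =====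
def Claim_equal_preceding_attrs : Prop := ∀ (text : String) (start_index : Int), Dom_preceding_attrs text start_index → Spec_preceding_attrs text start_index (preceding_attrs text start_index)

-- ===== LEMMAS AND PROOFS =====

-- ===== VERDICT (by name: the statement is the Claim_ definition above) =====
-- A's accumulator distributes out of the loop
theorem prAttrsLoopA_acc (xs acc : List String) :
    prAttrsLoopA xs acc = acc ++ prAttrsLoopA xs [] := by
  induction xs generalizing acc with
  | nil => simp [prAttrsLoopA]
  | cons l rest ih =>
    simp only [prAttrsLoopA]
    split_ifs with h1 h2
    · rw [List.nil_append, ih (acc ++ [PySem.Str.strip l]), ih [PySem.Str.strip l],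
        List.append_assoc]
    · exact ih acc
    · exact (List.append_nil acc).symm

-- backward scan (reversed) equals the forward resetting fold
theorem prAttrs_rev_eq_fold (ls : List String) :
    (prAttrsLoopA ls.reverse []).reverse = ls.foldl prAttrsStepB [] := by
  induction ls using List.reverseRecOn with
  | nil => simp [prAttrsLoopA]
  | append_singleton ls l ih =>
    rw [List.reverse_append, List.foldl_append]
    simp only [List.reverse_singleton, List.singleton_append, List.foldl_cons, List.foldl_nil]
    simp only [prAttrsLoopA, prAttrsStepB]
    split_ifs with h1 h2 h3
    · rw [List.nil_append, prAttrsLoopA_acc, List.reverse_append, ih, List.reverse_singleton]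
    · exact absurd h2 h3
    · exact ih
    · rfl

theorem preceding_attrs_spec : Claim_equal_preceding_attrs := by
  intro text start_index _
  unfold Spec_preceding_attrs preceding_attrs preceding_attrs_alt
  exact congrArg (PySem.Str.join "\n")
    (prAttrs_rev_eq_fold (PySem.Str.splitlines (PySem.Str.slice text none (some start_index))))
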